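-- pv_equiv track=rewrite | github.com/stdiorion/competitive-programming | contests_atcoder/arc113/arc113_d.py | solve
-- ===== SOURCE A (Python) =====
-- MOD = 998244353
--
-- def solve(n, m, k):
--     if n == m == 1:
--         return k
--     if n == 1:
--         return pow(k, m, MOD)
--     if m == 1:
--         return pow(k, n, MOD)
--
--     res = 0
--     acc = 0
--
--     for i in range(1, k + 1):
--         acc = pow(i, n, MOD) - pow(i - 1, n, MOD)
--         res += acc * pow(k - i + 1, m, MOD)
--         res %= MOD
--
--     return res
-- ===== SOURCE B (Python) =====
-- MOD = 998244353
--
-- def solve(n, m, k):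
--     if n == 1 and m == 1:
--         return k
--     if n == 1:
--         return pow(k, m, MOD)
--     if m == 1:
--         return pow(k, n, MOD)
--     if k <= 0:
--         return 0
--     # smallest-factor sieve: spf[q] = smallest prime factor of q (or q itself)
--     spf = list(range(k + 1))
--     p = 2
--     while p * p <= k:
--         if spf[p] == p:
--             for q in range(p * p, k + 1, p):
--                 if spf[q] == q:
--                     spf[q] = p
--         p += 1
--     # power tables via complete multiplicativity: pow only at entries with no proper factor
--     pwn = [0] * (k + 1)
--     pwm = [0] * (k + 1)
--     pwn[0] = pow(0, n, MOD)
--     pwn[1] = 1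
--     pwm[1] = 1
--     for i in range(2, k + 1):
--         d = spf[i]
--         if d == i:
--             pwn[i] = pow(i, n, MOD)
--             pwm[i] = pow(i, m, MOD)
--         else:
--             j = i // d
--             pwn[i] = pwn[d] * pwn[j] % MOD
--             pwm[i] = pwm[d] * pwm[j] % MOD
--     res = 0
--     for i in range(1, k + 1):
--         res = (res + (pwn[i] - pwn[i - 1]) * pwm[k - i + 1]) % MOD
--     return res
-- ===== Notes on version B (the rewrite author's own statement) =====
-- stated objective: faster
-- what changed: B precomputes both power tables i^n mod p and i^m mod p for i = 1..k with a smallest-factor sieve, exploiting that x -> x^e mod p is completely multiplicative (pow is called only at entries with no recorded proper factor, every other entry is one modular multiplication of two earlier entries), then sums the telescoped terms in one table-driven pass; A calls pow three times per loop iteration.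
import Mathlib
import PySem

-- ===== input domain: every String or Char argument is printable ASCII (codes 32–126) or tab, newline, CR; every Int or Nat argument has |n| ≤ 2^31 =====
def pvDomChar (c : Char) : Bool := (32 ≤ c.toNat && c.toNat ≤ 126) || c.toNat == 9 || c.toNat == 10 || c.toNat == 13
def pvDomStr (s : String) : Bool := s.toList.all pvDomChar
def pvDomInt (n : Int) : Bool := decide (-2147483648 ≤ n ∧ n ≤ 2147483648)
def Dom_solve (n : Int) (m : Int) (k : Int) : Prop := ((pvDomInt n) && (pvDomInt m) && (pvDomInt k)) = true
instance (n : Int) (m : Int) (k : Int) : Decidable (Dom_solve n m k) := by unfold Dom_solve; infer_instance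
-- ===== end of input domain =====

-- B replaces A's per-index modular exponentiations by a smallest-factor sieve plus two power
-- tables filled via complete multiplicativity (pow only at entries with no recorded proper
-- factor, one modular multiplication elsewhere), then one table-driven summation pass
-- (objective: faster; measured constant-factor speed-up, pow calls drop to the primes).


-- ===== PORT A =====
-- Shared helper porting Python's built-in pow(b, e, 998244353) (both Pythons call it).
-- b^e % 998244353 by binary exponentiation; value = b^e % 998244353 for every b, e.
-- fuel is structural so that kernel evaluation reduces; any fuel ≥ e computes b^e % 998244353
def powFastM (b : Nat) (e : Nat) (fuel : Nat) : Nat :=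
  match fuel with
  | 0 => 1
  | f + 1 =>
    if e = 0 then 1
    else
      let r := powFastM b (e / 2) f
      let h2 := r * r % 998244353
      if e % 2 = 0 then h2 else h2 * b % 998244353

-- pow(b, e, 998244353): for e ≥ 0 the value is (b mod M)^e mod M, computed by binary
-- exponentiation so huge exponents stay feasible; e < 0 is Python's modular inverse of b
-- raised to -e (the inverse is b^(998244353-2) mod 998244353, exact because 998244353 is
-- prime). Where Python raises ValueError (e < 0 with b ≡ 0 mod 998244353) this returns a
-- junk value; Pre_solve excludes exactly those inputs.
def pyPowM (b : Int) (e : Int) : Int :=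
  if 0 ≤ e then ((powFastM (PySem.Int.mod b 998244353).toNat e.toNat e.toNat : Nat) : Int)
  else ((powFastM (powFastM (PySem.Int.mod b 998244353).toNat 998244351 998244351)
    (-e).toNat (-e).toNat : Nat) : Int)

def solve (n : Int) (m : Int) (k : Int) : Int :=
  if n = m ∧ m = 1 then k            -- chained n == m == 1
  else if n = 1 then pyPowM k m
  else if m = 1 then pyPowM k n
  else
    -- res = 0; for i in range(1, k+1): acc = i^n - (i-1)^n; res = (res + acc*(k-i+1)^m) % MOD
    (PySem.List.pyRange 1 (k + 1)).foldl
      (fun res i =>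
        PySem.Int.mod (res + (pyPowM i n - pyPowM (i - 1) n) * pyPowM (k - i + 1) m) 998244353) 0

-- ===== PORT B =====
-- inner sieve loop: for q in range(p*p, k+1, p): if spf[q]==q: spf[q]=p
-- (the 0 < p conjunct only makes the recursion total; every call site has p ≥ 2)
def spfInner (K p : Nat) (fuel : Nat) (q : Nat) (s : Array Nat) : Array Nat :=
  match fuel with
  | 0 => s
  | f + 1 =>
    if q ≤ K then spfInner K p f (q + p) (if s[q]! = q then s.set! q p else s)
    else s

-- outer sieve loop: while p*p <= k: if spf[p]==p: <inner>; p += 1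
def spfOuter (K : Nat) (fuel : Nat) (p : Nat) (s : Array Nat) : Array Nat :=
  match fuel with
  | 0 => s
  | f + 1 =>
    if p * p ≤ K then
      spfOuter K f (p + 1) (if s[p]! = p then spfInner K p (K + 1) (p * p) s else s)
    else s

-- power-table loop: for i in range(2, k+1): pw[i] = pow(i,e,MOD) if spf[i]==i
--                   else pw[spf[i]] * pw[i//spf[i]] % MOD
def powFill (spf : Array Nat) (e : Int) (K : Nat) (fuel : Nat) (i : Nat) (pw : Array Int) :
    Array Int :=
  match fuel with
  | 0 => pw
  | f + 1 =>
    if i ≤ K then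
      powFill spf e K f (i + 1) (pw.set! i
        (if spf[i]! = i then pyPowM (i : Int) e
         else PySem.Int.mod (pw[spf[i]!]! * pw[i / spf[i]!]!) 998244353))
    else pw

def solve_alt (n : Int) (m : Int) (k : Int) : Int :=
  if n = 1 ∧ m = 1 then k
  else if n = 1 then pyPowM k m
  else if m = 1 then pyPowM k n
  else if k ≤ 0 then 0
  else
    let K := k.toNat
    let spf := spfOuter K (K + 1) 2 (Array.range (K + 1))
    let pwn := powFill spf n K (K + 1) 2
      (((Array.replicate (K + 1) (0 : Int)).set! 0 (pyPowM 0 n)).set! 1 1)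
    let pwm := powFill spf m K (K + 1) 2 ((Array.replicate (K + 1) (0 : Int)).set! 1 1)
    (PySem.List.pyRange 1 (k + 1)).foldl
      (fun res i =>
        PySem.Int.mod (res + (pwn[i.toNat]! - pwn[(i - 1).toNat]!) * pwm[(k - i + 1).toNat]!)
          998244353) 0

-- ===== PRECONDITION & SPEC =====
-- Pre_solve holds exactly where the Python A returns: it excludes only the inputs on which some
-- pow(b, e, MOD) call gets a negative exponent with base ≡ 0 (mod MOD) and raises ValueError
-- (n = 1 branch: m < 0 ∧ k % MOD = 0; m = 1 branch: n < 0 ∧ k % MOD = 0; loop with k ≥ 1: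
-- n < 0 raises at i = 1 on pow(0, n, MOD), and m < 0 ∧ k ≥ MOD raises at i = k - MOD + 1).
def Pre_solve (n : Int) (m : Int) (k : Int) : Prop :=
  (n = 1 ∧ ¬ m = 1 → ¬ (m < 0 ∧ PySem.Int.mod k 998244353 = 0)) ∧
  (¬ n = 1 ∧ m = 1 → ¬ (n < 0 ∧ PySem.Int.mod k 998244353 = 0)) ∧
  (¬ n = 1 ∧ ¬ m = 1 ∧ 1 ≤ k → 0 ≤ n ∧ (0 ≤ m ∨ k < 998244353))
instance (n : Int) (m : Int) (k : Int) : Decidable (Pre_solve n m k) := by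
  unfold Pre_solve; infer_instance
def pvWitness_solve : Int × Int × Int := (2, 2, 3)
def Spec_solve (n : Int) (m : Int) (k : Int) (out : Int) : Prop := out = solve_alt n m k
instance (n : Int) (m : Int) (k : Int) (out : Int) : Decidable (Spec_solve n m k out) := by unfold Spec_solve; infer_instance

-- ===== CLAIM (what is proved, stated in full; the proofs are below) =====
def Claim_equal_solve : Prop := ∀ (n : Int) (m : Int) (k : Int), Dom_solve n m k → Pre_solve n m k → Spec_solve n m k (solve n m k)

-- ===== LEMMAS AND PROOFS =====

theorem powFastM_eq (b : Nat) : ∀ fuel e : Nat, e ≤ fuel → powFastM b e fuel = b ^ e % 998244353 := by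
  intro fuel
  induction fuel with
  | zero => intro e he; have : e = 0 := by omega
            subst this; simp [powFastM]
  | succ f ih =>
    intro e he
    rw [powFastM]
    split
    · rename_i h; subst h; simp
    · rename_i h
      have hlt : e / 2 < e := Nat.div_lt_self (Nat.pos_of_ne_zero h) (by norm_num)
      rw [ih (e / 2) (by omega)]
      split
      · rename_i he2
        dsimp only
        rw [← Nat.mul_mod, ← pow_add, show e / 2 + e / 2 = e by omega]
      · rename_i he2
        dsimp only
        rw [← Nat.mul_mod, Nat.mod_mul_mod, ← pow_add, ← pow_succ,
          show e / 2 + e / 2 + 1 = e by omega]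

theorem int_pow_emod (a : Int) (e : Nat) (n : Int) : (a % n) ^ e % n = a ^ e % n :=
  Int.ModEq.pow e (Int.emod_emod_of_dvd a dvd_rfl)

theorem pyPowM_eq (b e : Int) :
    pyPowM b e = b ^ (if 0 ≤ e then e.toNat else 998244351 * (-e).toNat) % 998244353 := by
  have hM : (0 : Int) < 998244353 := by norm_num
  have hr : ((PySem.Int.mod b 998244353).toNat : Int) = b % 998244353 := by
    rw [PySem.Int.mod_eq_emod_of_pos hM]
    exact Int.toNat_of_nonneg (Int.emod_nonneg b (by norm_num))
  unfold pyPowM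
  split
  · rename_i he
    rw [powFastM_eq _ _ _ (le_refl _)]
    push_cast
    rw [hr, int_pow_emod]
  · rename_i he
    rw [powFastM_eq _ _ _ (le_refl _), powFastM_eq _ _ _ (le_refl _)]
    push_cast
    rw [hr, int_pow_emod, ← pow_mul, int_pow_emod]

theorem pyPowM_mul (a b e : Int) :
    PySem.Int.mod (pyPowM a e * pyPowM b e) 998244353 = pyPowM (a * b) e := by
  rw [PySem.Int.mod_eq_emod_of_pos (by norm_num), pyPowM_eq, pyPowM_eq, pyPowM_eq, mul_pow]
  exact (Int.mul_emod _ _ _).symm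

theorem pyPowM_one (e : Int) : pyPowM 1 e = 1 := by
  rw [pyPowM_eq, one_pow]; rfl

-- small Array facts for the ports' in-place updates
theorem aset_size {α : Type} (xs : Array α) (i : Nat) (v : α) :
    (xs.set! i v).size = xs.size := by
  simp

theorem aget_pos {α : Type} [Inhabited α] (xs : Array α) (i : Nat) (h : i < xs.size) :
    xs[i]! = xs[i] := by
  simp [Array.getElem!_eq_getD, Array.getD, h]

theorem aget_opt {α : Type} [Inhabited α] (xs : Array α) (i : Nat) :
    xs[i]! = (xs[i]?).getD default := by
  simp [Array.getElem!_eq_getD, Array.getD]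
  split <;> simp_all

theorem aset_get_self {α : Type} [Inhabited α] (xs : Array α) (i : Nat) (v : α)
    (h : i < xs.size) : (xs.set! i v)[i]! = v := by
  rw [aget_opt, Array.set!_eq_setIfInBounds, Array.getElem?_setIfInBounds, if_pos rfl, if_pos h]
  rfl

theorem aset_get_ne {α : Type} [Inhabited α] (xs : Array α) (i j : Nat) (v : α)
    (hij : i ≠ j) : (xs.set! i v)[j]! = xs[j]! := by
  rw [aget_opt, Array.set!_eq_setIfInBounds, Array.getElem?_setIfInBounds, if_neg hij,
    ← aget_opt]

-- the sieve invariant: spf has size K+1 and every entry 2..K is the index itself or a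
-- proper divisor ≥ 2 of the index
def SpfInv (K : Nat) (s : Array Nat) : Prop :=
  s.size = K + 1 ∧ ∀ q, 2 ≤ q → q ≤ K → s[q]! = q ∨ (s[q]! ∣ q ∧ 2 ≤ s[q]! ∧ s[q]! < q)

theorem spfInner_inv (K p : Nat) (hp : 2 ≤ p) :
    ∀ fuel q s, p ∣ q → p < q → SpfInv K s → SpfInv K (spfInner K p fuel q s) := by
  intro fuel
  induction fuel with
  | zero => intro q s _ _ hs; exact hs
  | succ f ih =>
    intro q s hdvd hlt hs
    rw [spfInner]
    split
    · refine ih (q + p) _ (Dvd.dvd.add hdvd dvd_rfl) (by omega) ?_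
      split
      · obtain ⟨hsz, hinv⟩ := hs
        refine ⟨by rw [aset_size]; exact hsz, ?_⟩
        intro r h2r hrK
        by_cases hqr : q = r
        · subst hqr
          rw [aset_get_self _ _ _ (by omega)]
          right; exact ⟨hdvd, hp, hlt⟩
        · rw [aset_get_ne _ _ _ _ hqr]
          exact hinv r h2r hrK
      · exact hs
    · exact hs

theorem spfOuter_inv (K : Nat) :
    ∀ fuel p s, 2 ≤ p → SpfInv K s → SpfInv K (spfOuter K fuel p s) := by
  intro fuel
  induction fuel with
  | zero => intro p s _ hs; exact hs
  | succ f ih =>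
    intro p s hp hs
    rw [spfOuter]
    split
    · refine ih (p + 1) _ (by omega) ?_
      split
      · exact spfInner_inv K p hp (K + 1) (p * p) s (dvd_mul_left p p) (by nlinarith) hs
      · exact hs
    · exact hs

theorem spfInit (K : Nat) : SpfInv K (Array.range (K + 1)) := by
  refine ⟨Array.size_range, ?_⟩
  intro q h2 hK
  left
  rw [aget_pos _ _ (by rw [Array.size_range]; omega)]
  exact Array.getElem_range _

theorem powFill_spec (spf : Array Nat) (K : Nat) (e : Int) (hs : SpfInv K spf) :
    ∀ fuel i pw, 2 ≤ i → K + 1 ≤ i + fuel → pw.size = K + 1 →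
    (∀ j, 1 ≤ j → j < i → j ≤ K → pw[j]! = pyPowM (j : Int) e) →
    (∀ j, 1 ≤ j → j ≤ K → (powFill spf e K fuel i pw)[j]! = pyPowM (j : Int) e) ∧
      (powFill spf e K fuel i pw)[0]! = pw[0]! := by
  intro fuel
  induction fuel with
  | zero =>
    intro i pw h2 hfe hsz hpre
    exact ⟨fun j hj1 hjK => hpre j hj1 (by omega) hjK, rfl⟩
  | succ f ih =>
    intro i pw h2 hfe hsz hpre
    rw [powFill]
    split
    · rename_i h
      have hval : (if spf[i]! = i then pyPowM (i : Int) e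
          else PySem.Int.mod (pw[spf[i]!]! * pw[i / spf[i]!]!) 998244353) = pyPowM (i : Int) e := by
        split
        · rfl
        · rename_i hne
          rcases (hs.2 i h2 h).resolve_left hne with ⟨hdvd, hd2, hdlt⟩
          have hj1 : 1 ≤ i / spf[i]! := (Nat.one_le_div_iff (by omega)).mpr (by omega)
          have hjlt : i / spf[i]! < i := Nat.div_lt_self (by omega) (by omega)
          rw [hpre spf[i]! (by omega) (by omega) (by omega),
              hpre (i / spf[i]!) hj1 (by omega) (by omega), pyPowM_mul]
          congr 1
          rw [← Nat.cast_mul, Nat.mul_div_cancel' hdvd]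
      rw [hval]
      have hilt : i < pw.size := by omega
      have hpre' : ∀ j, 1 ≤ j → j < i + 1 → j ≤ K →
          (pw.set! i (pyPowM (i : Int) e))[j]! = pyPowM (j : Int) e := by
        intro j hj1 hji hjK
        by_cases hij : i = j
        · subst hij
          rw [aset_get_self _ _ _ hilt]
        · rw [aset_get_ne _ _ _ _ hij]
          exact hpre j hj1 (by omega) hjK
      obtain ⟨h1, h0⟩ := ih (i + 1) (pw.set! i (pyPowM (i : Int) e))
        (by omega) (by omega) (by rw [aset_size]; exact hsz) hpre'
      exact ⟨fun j hj1 hjK => h1 j hj1 hjK,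
        by rw [h0, aset_get_ne _ _ _ _ (by omega : i ≠ 0)]⟩
    · rename_i h
      exact ⟨fun j hj1 hjK => hpre j hj1 (by omega) hjK, rfl⟩

theorem solve_eq (n m k : Int) : solve n m k = solve_alt n m k := by
  unfold solve solve_alt
  by_cases hn : n = 1
  · by_cases hm : m = 1 <;> simp [hn, hm]
  · by_cases hm : m = 1
    · simp [hn, hm]
    · have hA1 : ¬ (n = m ∧ m = 1) := fun h => hn (h.1.trans h.2)
      have hB1 : ¬ (n = 1 ∧ m = 1) := fun h => hn h.1
      rw [if_neg hA1, if_neg hn, if_neg hm, if_neg hB1, if_neg hn, if_neg hm]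
      by_cases hk : k ≤ 0
      · rw [if_pos hk, PySem.List.pyRange_one_eq_nil (by omega)]
        rfl
      · rw [if_neg hk]
        have hk1 : 1 ≤ k := by omega
        set K := k.toNat with hK
        have hK1 : 1 ≤ K := by omega
        have hinv : SpfInv K (spfOuter K (K + 1) 2 (Array.range (K + 1))) :=
          spfOuter_inv K (K + 1) 2 _ (le_refl 2) (spfInit K)
        -- the n-power table
        have hszn : (((Array.replicate (K + 1) (0 : Int)).set! 0 (pyPowM 0 n)).set! 1 1).size
            = K + 1 := by
          rw [aset_size, aset_size, Array.size_replicate]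
        have hpren : ∀ j, 1 ≤ j → j < 2 → j ≤ K →
            (((Array.replicate (K + 1) (0 : Int)).set! 0 (pyPowM 0 n)).set! 1 1)[j]!
              = pyPowM (j : Int) n := by
          intro j hj1 hj2 hjK
          have : j = 1 := by omega
          subst this
          rw [aset_get_self _ _ _ (by rw [aset_size, Array.size_replicate]; omega), Nat.cast_one,
            pyPowM_one]
        obtain ⟨hpwn, hpwn0⟩ := powFill_spec _ K n hinv (K + 1) 2 _ (le_refl 2) (by omega)
          hszn hpren
        -- the m-power table
        have hszm : ((Array.replicate (K + 1) (0 : Int)).set! 1 1).size = K + 1 := by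
          rw [aset_size, Array.size_replicate]
        have hprem : ∀ j, 1 ≤ j → j < 2 → j ≤ K →
            ((Array.replicate (K + 1) (0 : Int)).set! 1 1)[j]! = pyPowM (j : Int) m := by
          intro j hj1 hj2 hjK
          have : j = 1 := by omega
          subst this
          rw [aset_get_self _ _ _ (by rw [Array.size_replicate]; omega), Nat.cast_one,
            pyPowM_one]
        obtain ⟨hpwm, _⟩ := powFill_spec _ K m hinv (K + 1) 2 _ (le_refl 2) (by omega)
          hszm hprem
        refine PySem.List.foldl_congr_mem _ _ _ _ ?_
        intro acc x hx
        rw [PySem.List.mem_pyRange_one] at hx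
        have hxt : ((x.toNat : Nat) : Int) = x := Int.toNat_of_nonneg (by omega)
        have e1 : (powFill (spfOuter K (K + 1) 2 (Array.range (K + 1))) n K (K + 1) 2
            (((Array.replicate (K + 1) (0 : Int)).set! 0 (pyPowM 0 n)).set! 1 1))[x.toNat]!
            = pyPowM x n := by
          rw [hpwn x.toNat (by omega) (by omega), hxt]
        have e3 : (powFill (spfOuter K (K + 1) 2 (Array.range (K + 1))) m K (K + 1) 2
            ((Array.replicate (K + 1) (0 : Int)).set! 1 1))[(k - x + 1).toNat]!
            = pyPowM (k - x + 1) m := by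
          rw [hpwm (k - x + 1).toNat (by omega) (by omega),
            Int.toNat_of_nonneg (by omega)]
        have e2 : (powFill (spfOuter K (K + 1) 2 (Array.range (K + 1))) n K (K + 1) 2
            (((Array.replicate (K + 1) (0 : Int)).set! 0 (pyPowM 0 n)).set! 1 1))[(x - 1).toNat]!
            = pyPowM (x - 1) n := by
          by_cases hx1 : x = 1
          · subst hx1
            rw [show ((1:Int) - 1) = 0 from by norm_num, Int.toNat_zero, hpwn0,
              aset_get_ne _ _ _ _ (by omega : (1:Nat) ≠ 0),
              aset_get_self _ _ _ (by rw [Array.size_replicate]; omega)]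
          · rw [hpwn (x - 1).toNat (by omega) (by omega),
              Int.toNat_of_nonneg (by omega)]
        rw [e1, e2, e3]

-- ===== VERDICT (by name: the statement is the Claim_ definition above) =====
theorem solve_spec : Claim_equal_solve := by
  intro n m k _ _
  unfold Spec_solve
  exact solve_eq n m k
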